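-- pv_equiv track=rewrite | github.com/Tinus1424/dss | old/1_dp/week4/3challenge/C10-c1.py | distil
-- ===== SOURCE A (Python) =====
-- def distil(text):
--     text = text.split("[")
--     wordlist = ""
--     for word in text:
--         if not "]" in word:
--             continue
--         index = word.find("]")
--         wordlist += word[:index]
--     return wordlist
-- ===== SOURCE B (Python) =====
-- def distil(text):
--     # Single left-to-right character scan with a small state machine:
--     # buffer chars of the current segment (since start or last '['),
--     # emit the buffer at the segment's first ']'; no split/find passes.
--     parts = []
--     buf = []
--     closed = False
--     for c in text:
--         if c == '[':
--             buf = []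
--             closed = False
--         elif not closed:
--             if c == ']':
--                 parts.append(''.join(buf))
--                 closed = True
--             else:
--                 buf.append(c)
--     return ''.join(parts)
-- ===== Notes on version B (the rewrite author's own statement) =====
-- stated objective: alternative
-- what changed: A splits the text on '[' and runs a find(']') plus slice pass over each segment; B makes a single left-to-right character scan with a buffer and a closed flag, emitting the buffer at each segment's first ']'.
import Mathlib
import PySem

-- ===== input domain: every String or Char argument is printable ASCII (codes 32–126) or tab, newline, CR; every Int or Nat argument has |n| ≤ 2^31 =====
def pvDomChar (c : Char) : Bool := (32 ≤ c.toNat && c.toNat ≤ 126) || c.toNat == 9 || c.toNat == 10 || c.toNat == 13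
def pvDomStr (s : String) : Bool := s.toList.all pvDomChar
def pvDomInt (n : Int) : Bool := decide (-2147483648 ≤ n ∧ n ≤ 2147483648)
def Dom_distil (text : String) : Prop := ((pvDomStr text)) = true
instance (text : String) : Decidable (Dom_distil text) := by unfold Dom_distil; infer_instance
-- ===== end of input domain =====

-- B replaces A's split-on-'[' + per-segment find-']' passes by a single
-- left-to-right character scan with a buffer and a closed flag (objective: alternative).

-- ===== PORT A =====
-- Literal port of A: split on "[", then for each word skip it unless "]" occurs,
-- else append word[:word.find("]")].
def distil (text : String) : String :=
  let segs := PySem.Chars.splitOn text.toList "[".toList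
  let wordlist := segs.foldl (fun wordlist word =>
    if !(PySem.Chars.isIn "]".toList word) then wordlist
    else
      let index := PySem.Chars.find word "]".toList
      wordlist ++ PySem.Chars.slice word none (some index)) []
  String.ofList wordlist

-- ===== PORT B =====
-- Literal port of Source B's scan loop: state = (emitted parts, current buffer, closed flag).
def distilScan : List Char → List Char → List Char → Bool → List Char
  | [], parts, _, _ => parts
  | c :: cs, parts, buf, closed =>
    if c = '[' then distilScan cs parts [] false
    else if closed then distilScan cs parts buf closed
    else if c = ']' then distilScan cs (parts ++ buf) buf true
    else distilScan cs parts (buf ++ [c]) closed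

def distil_alt (text : String) : String :=
  String.ofList (distilScan text.toList [] [] false)

-- ===== PRECONDITION & SPEC =====
def Spec_distil (text : String) (out : String) : Prop := out = distil_alt text
instance (text : String) (out : String) : Decidable (Spec_distil text out) := by unfold Spec_distil; infer_instance

-- ===== CLAIM (what is proved, stated in full; the proofs are below) =====
def Claim_equal_distil : Prop := ∀ (text : String), Dom_distil text → Spec_distil text (distil text)

-- ===== LEMMAS AND PROOFS =====

-- Reference split on '[' (structural recursion).
def mySplit : List Char → List (List Char)
  | [] => [[]]
  | c :: cs =>
    if c = '[' then [] :: mySplit cs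
    else
      match mySplit cs with
      | [] => [[c]]
      | h :: t => (c :: h) :: t

-- Contribution of one segment.
def contrib (w : List Char) : List Char :=
  if ']' ∈ w then w.takeWhile (· ≠ ']') else []

theorem mySplit_ne_nil (cs : List Char) : mySplit cs ≠ [] := by
  cases cs with
  | nil => simp [mySplit]
  | cons c cs =>
    simp only [mySplit]
    split
    · simp
    · split <;> simp

theorem splitOn_go_spec (fuel : Nat) : ∀ (l cur : List Char) (acc : List (List Char)),
    l.length < fuel →
    PySem.Chars.splitOn.go ['['] fuel l cur acc =
      acc.reverse ++ (cur.reverse ++ (mySplit l).headD []) :: (mySplit l).tail := by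
  induction fuel with
  | zero => intro l cur acc h; omega
  | succ fuel ih =>
    intro l cur acc h
    cases l with
    | nil => simp [PySem.Chars.splitOn.go, mySplit]
    | cons c rest =>
      by_cases hc : c = '['
      · subst hc
        have : PySem.Chars.splitOn.go ['['] (fuel+1) ('[' :: rest) cur acc =
            PySem.Chars.splitOn.go ['['] fuel rest [] (cur.reverse :: acc) := by
          simp [PySem.Chars.splitOn.go, List.isPrefixOf]
        rw [this, ih rest [] (cur.reverse :: acc) (by simpa using h)]
        simp [mySplit]
        cases hm : mySplit rest with
        | nil => exact absurd hm (mySplit_ne_nil rest)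
        | cons h t => simp
      · have : PySem.Chars.splitOn.go ['['] (fuel+1) (c :: rest) cur acc =
            PySem.Chars.splitOn.go ['['] fuel rest (c :: cur) acc := by
          simp [PySem.Chars.splitOn.go, List.isPrefixOf]
          intro h'; exact absurd h'.symm hc
        rw [this, ih rest (c :: cur) acc (by simpa using h)]
        simp only [mySplit, if_neg hc]
        cases hm : mySplit rest with
        | nil => exact absurd hm (mySplit_ne_nil rest)
        | cons h t => simp

theorem splitOn_eq_mySplit (cs : List Char) :
    PySem.Chars.splitOn cs ['['] = mySplit cs := by
  have := splitOn_go_spec (cs.length + 1) cs [] [] (by omega)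
  rw [PySem.Chars.splitOn, this]
  cases hm : mySplit cs with
  | nil => exact absurd hm (mySplit_ne_nil cs)
  | cons h t => simp

theorem find_go_singleton (l : List Char) : ∀ (k : Nat),
    PySem.Chars.find.go [']'] l k =
      if ']' ∈ l then ((k : Int) + (l.takeWhile (· ≠ ']')).length) else -1 := by
  induction l with
  | nil => intro k; simp [PySem.Chars.find.go]
  | cons c cs ih =>
    intro k
    by_cases hc : c = ']'
    · subst hc
      simp [PySem.Chars.find.go, List.isPrefixOf, List.takeWhile]
    · have h1 : PySem.Chars.find.go [']'] (c :: cs) k =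
          PySem.Chars.find.go [']'] cs (k + 1) := by
        simp [PySem.Chars.find.go, List.isPrefixOf]
        intro h'; exact absurd h'.symm hc
      rw [h1, ih (k+1)]
      have hne : ¬ (']' = c) := fun h => hc h.symm
      rw [List.takeWhile_cons_of_pos (p := fun x => decide (x ≠ ']')) (by simp [hc])]
      by_cases hm : ']' ∈ cs
      · simp only [hm, if_pos, List.mem_cons, hne, false_or, List.length_cons]
        push_cast; ring
      · simp [hm, hne]

theorem find_singleton (w : List Char) :
    PySem.Chars.find w [']'] =
      if ']' ∈ w then (((w.takeWhile (· ≠ ']')).length : Int)) else -1 := by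
  rw [PySem.Chars.find, find_go_singleton]
  simp

theorem take_takeWhile_len (w : List Char) (p : Char → Bool) :
    w.take (w.takeWhile p).length = w.takeWhile p := by
  obtain ⟨t, ht⟩ := List.takeWhile_prefix (l := w) (p := p)
  nth_rewrite 2 [← ht]
  exact List.take_left

theorem takeWhile_no_close (buf h : List Char) (hb : ']' ∉ buf) :
    (buf ++ ']' :: h).takeWhile (· ≠ ']') = buf := by
  induction buf with
  | nil => simp
  | cons a l ih =>
    have ha : a ≠ ']' := fun e => hb (by simp [e])
    rw [List.cons_append, List.takeWhile_cons_of_pos (by simp [ha]),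
      ih (fun m => hb (List.mem_cons_of_mem _ m))]

-- One step of A's fold body equals appending contrib.
theorem step_eq_contrib (acc w : List Char) :
    (if !(PySem.Chars.isIn "]".toList w) then acc
     else acc ++ PySem.Chars.slice w none (some (PySem.Chars.find w "]".toList)))
    = acc ++ contrib w := by
  have hs : ("]".toList : List Char) = [']'] := rfl
  rw [hs]
  by_cases hm : ']' ∈ w
  · have hf : PySem.Chars.find w [']'] = ((w.takeWhile (· ≠ ']')).length : Int) := by
      rw [find_singleton, if_pos hm]
    have hin : PySem.Chars.isIn [']'] w = true := by
      simp [PySem.Chars.isIn, hf]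
    rw [hin, hf, PySem.Chars.slice_eq_listSlice, PySem.List.slice_to w (by positivity)]
    simp [take_takeWhile_len, contrib, hm]
  · have hf : PySem.Chars.find w [']'] = -1 := by
      rw [find_singleton, if_neg hm]
    have hin : PySem.Chars.isIn [']'] w = false := by
      simp [PySem.Chars.isIn, hf]
    rw [hin]
    simp [contrib, hm]

theorem distil_eq_flat (text : String) :
    distil text = String.ofList (List.flatMap contrib (mySplit text.toList)) := by
  unfold distil
  have hsep : ("[".toList : List Char) = ['['] := rfl
  rw [hsep, splitOn_eq_mySplit]
  have : ∀ (l : List (List Char)) (acc : List Char),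
      l.foldl (fun wordlist word =>
        if !(PySem.Chars.isIn "]".toList word) then wordlist
        else wordlist ++ PySem.Chars.slice word none (some (PySem.Chars.find word "]".toList))) acc
      = acc ++ List.flatMap contrib l := by
    intro l
    induction l with
    | nil => intro acc; simp
    | cons w l ih =>
      intro acc
      simp only [List.foldl_cons, List.flatMap_cons]
      rw [step_eq_contrib, ih, List.append_assoc]
  exact congrArg String.ofList ((this (mySplit text.toList) []).trans (by simp))

-- The scan's invariant: buf holds the ']'-free part of the current segment seen so far.
theorem scan_spec : ∀ (cs parts buf : List Char) (closed : Bool), ']' ∉ buf →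
    distilScan cs parts buf closed =
      parts ++ (if closed then List.flatMap contrib (mySplit cs).tail
        else contrib (buf ++ (mySplit cs).headD []) ++ List.flatMap contrib (mySplit cs).tail) := by
  intro cs
  induction cs with
  | nil =>
    intro parts buf closed hb
    cases closed <;> simp [distilScan, mySplit, contrib, hb]
  | cons c cs ih =>
    intro parts buf closed hb
    obtain ⟨h, t, hm⟩ : ∃ h t, mySplit cs = h :: t := by
      cases hms : mySplit cs with
      | nil => exact absurd hms (mySplit_ne_nil cs)
      | cons h t => exact ⟨h, t, rfl⟩
    by_cases hc : c = '['
    · subst hc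
      rw [show distilScan ('[' :: cs) parts buf closed = distilScan cs parts [] false from by
        simp [distilScan]]
      rw [ih parts [] false (by simp)]
      simp only [mySplit, reduceIte, hm]
      cases closed <;> simp [contrib, hb]
    · cases closed with
      | true =>
        rw [show distilScan (c :: cs) parts buf true = distilScan cs parts buf true from by
          simp [distilScan, hc]]
        rw [ih parts buf true hb]
        simp [mySplit, hc, hm]
      | false =>
        by_cases hcr : c = ']'
        · subst hcr
          rw [show distilScan (']' :: cs) parts buf false
                = distilScan cs (parts ++ buf) buf true from by simp [distilScan]]
          rw [ih (parts ++ buf) buf true hb]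
          have hcon : contrib (buf ++ (']' :: h)) = buf := by
            unfold contrib
            rw [if_pos (show (']' : Char) ∈ buf ++ ']' :: h by simp)]
            exact takeWhile_no_close buf h hb
          simp [mySplit, hc, hm, hcon]
        · rw [show distilScan (c :: cs) parts buf false
                = distilScan cs parts (buf ++ [c]) false from by simp [distilScan, hc, hcr]]
          rw [ih parts (buf ++ [c]) false (by simp [hb]; exact fun e => hcr e.symm)]
          simp [mySplit, hc, hm]

theorem distil_alt_eq_flat (text : String) :
    distil_alt text = String.ofList (List.flatMap contrib (mySplit text.toList)) := by
  unfold distil_alt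
  rw [scan_spec text.toList [] [] false (by simp)]
  obtain ⟨h, t, hm⟩ : ∃ h t, mySplit text.toList = h :: t := by
    cases hms : mySplit text.toList with
    | nil => exact absurd hms (mySplit_ne_nil _)
    | cons h t => exact ⟨h, t, rfl⟩
  simp [hm, List.flatMap_cons]

-- ===== VERDICT (by name: the statement is the Claim_ definition above) =====
theorem distil_spec : Claim_equal_distil := by
  intro text _
  unfold Spec_distil
  rw [distil_eq_flat, distil_alt_eq_flat]
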